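-- pv_equiv track=rewrite | github.com/dennisbiber/sociopathy | sociotransmitters.py | checkForSuffix
-- ===== SOURCE A (Python) =====
-- consonantList = ["b", "c", "d", "f", "g", "h", "j", "k", "l", "m", "n", "o", "p", "q",
--                   "r", "s", "t", "v", "w", "x", "y", "z"]
--
-- vowelsList = ["a", "e", "i", "o", "u", "y"]
--
-- def checkForSuffix(word, suffixKeys):
--     pattern = getPattern(word)
--     lenCheck = 0
--     for suf in suffixKeys:
--         def checker(word, suf):
--             if suf == word[-len(suf)::]:
--                 return len(suf)
--             return 0
--         if len(suf) >= lenCheck: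
--             new = checker(word, suf)
--             if new > lenCheck:
--                 lenCheck = new
--     if lenCheck != 0:
--         return [word[0:-lenCheck], word[-lenCheck::]]
--     else:
--         return None
--
-- def getPattern(word):
--     stringPatternCheck = ""
--     for x in range(len(word)):
--         if x != len(word):
--             letter = word[x]
--             if letter in vowelsList:
--                 if [0, "y"] == [x, letter.lower()]:
--                     stringPatternCheck += "C"
--                 elif [not 0, "y"] == [x, letter.lower()]:
--                     stringPatternCheck += "V"
--                 else:
--                     stringPatternCheck += "V"
--             elif letter in consonantList:
--                 stringPatternCheck += "C"
--     return stringPatternCheck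
-- ===== SOURCE B (Python) =====
-- def checkForSuffix(word, suffixKeys):
--     for suf in sorted(suffixKeys, key=len, reverse=True):
--         if suf and word.endswith(suf):
--             return [word[:-len(suf)], word[-len(suf):]]
--     return None
-- ===== Notes on version B (the rewrite author's own statement) =====
-- stated objective: faster
-- what changed: Drops A's dead getPattern(word) call and replaces the max-keeping scan by sorting the suffixes by descending length and returning the split at the first nonempty suffix that word ends with (early exit).
import Mathlib
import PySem

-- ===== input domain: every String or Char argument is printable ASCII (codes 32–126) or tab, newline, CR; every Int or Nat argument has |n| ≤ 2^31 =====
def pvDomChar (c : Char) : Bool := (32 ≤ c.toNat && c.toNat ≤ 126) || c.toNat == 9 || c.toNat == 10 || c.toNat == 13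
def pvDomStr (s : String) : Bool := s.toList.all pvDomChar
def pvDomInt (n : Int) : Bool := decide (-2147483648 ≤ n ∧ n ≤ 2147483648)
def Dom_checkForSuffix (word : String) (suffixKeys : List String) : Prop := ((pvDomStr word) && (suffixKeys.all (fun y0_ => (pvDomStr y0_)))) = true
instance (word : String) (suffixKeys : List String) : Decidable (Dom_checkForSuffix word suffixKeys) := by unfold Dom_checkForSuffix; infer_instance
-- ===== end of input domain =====

-- B drops A's dead getPattern call and replaces the max-keeping scan by a sort-by-descending-length,
-- early-exit traversal; same return value, measured faster by a constant factor.

-- ===== PORT A =====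
def pvConsonantList : List String := ["b", "c", "d", "f", "g", "h", "j", "k", "l", "m", "n", "o", "p", "q",
  "r", "s", "t", "v", "w", "x", "y", "z"]

def pvVowelsList : List String := ["a", "e", "i", "o", "u", "y"]

-- dead code in A (its result is unused), ported faithfully; [not 0, "y"] == [x, lower] means x == 1
def getPattern (word : String) : String :=
  String.ofList ((List.range word.toList.length).foldl (fun acc x =>
    if x ≠ word.toList.length then
      let letter := word.toList.getD x ' '
      if String.ofList [letter] ∈ pvVowelsList then
        if x = 0 ∧ PySem.Chars.lowerChar letter = 'y' then acc ++ ['C']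
        else if x = 1 ∧ PySem.Chars.lowerChar letter = 'y' then acc ++ ['V']
        else acc ++ ['V']
      else if String.ofList [letter] ∈ pvConsonantList then acc ++ ['C']
      else acc
    else acc) [])

-- the inner 'def checker(word, suf)' of A
def pyChecker (word suf : String) : Nat :=
  if suf = PySem.Str.slice word (some (-(suf.toList.length : Int))) none then suf.toList.length else 0

def checkForSuffix (word : String) (suffixKeys : List String) : Option (List String) :=
  let _pattern := getPattern word
  let lenCheck := suffixKeys.foldl (fun lenCheck suf =>
    if suf.toList.length ≥ lenCheck then
      let new := pyChecker word suf
      if new > lenCheck then new else lenCheck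
    else lenCheck) 0
  if lenCheck ≠ 0 then
    some [PySem.Str.slice word (some 0) (some (-(lenCheck : Int))),
          PySem.Str.slice word (some (-(lenCheck : Int))) none]
  else none

-- ===== PORT B =====
-- the for-loop of Source B with its early return
def altScan (word : String) : List String → Option (List String)
  | [] => none
  | suf :: rest =>
    if suf ≠ "" ∧ PySem.Str.endswith word suf = true then
      some [PySem.Str.slice word none (some (-(suf.toList.length : Int))),
            PySem.Str.slice word (some (-(suf.toList.length : Int))) none]
    else altScan word rest

def checkForSuffix_alt (word : String) (suffixKeys : List String) : Option (List String) :=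
  altScan word (PySem.List.sorted suffixKeys (fun s => s.toList.length) true)

-- ===== PRECONDITION & SPEC =====
def Spec_checkForSuffix (word : String) (suffixKeys : List String) (out : Option (List String)) : Prop := out = checkForSuffix_alt word suffixKeys
instance (word : String) (suffixKeys : List String) (out : Option (List String)) : Decidable (Spec_checkForSuffix word suffixKeys out) := by unfold Spec_checkForSuffix; infer_instance

-- ===== CLAIM (what is proved, stated in full; the proofs are below) =====
def Claim_equal_checkForSuffix : Prop := ∀ (word : String) (suffixKeys : List String), Dom_checkForSuffix word suffixKeys → Spec_checkForSuffix word suffixKeys (checkForSuffix word suffixKeys)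

-- ===== LEMMAS AND PROOFS =====

-- the max of the matched lengths, which both programs' answers are a function of
def pvMax (word : String) (ls : List String) : Nat :=
  ls.foldl (fun a s => max a (pyChecker word s)) 0

theorem pyChecker_le (word s : String) : pyChecker word s ≤ s.toList.length := by
  unfold pyChecker; split <;> omega

theorem pyChecker_ne_zero_iff (word s : String) :
    pyChecker word s ≠ 0 ↔ (s ≠ "" ∧ PySem.Str.endswith word s = true) := by
  unfold pyChecker
  rcases eq_or_ne s "" with rfl | hs
  · simp
  · have hk : 0 < s.toList.length := by
      cases h : s.toList with
      | nil => exact absurd (String.toList_inj.mp (by simp [h])) hs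
      | cons a l => simp
    have h1 : (PySem.Str.slice word (some (-(s.toList.length : Int))) none).toList
        = PySem.List.slice word.toList (some (-(s.toList.length : Int))) none := by simp
    have hsl : (PySem.Str.slice word (some (-(s.toList.length : Int))) none).toList
        = word.toList.drop (word.toList.length - s.toList.length) := by
      rw [h1, PySem.List.slice_from_neg_natCast _ _ hk]
    split_ifs with h
    · have hsuf : s.toList <:+ word.toList := by
        have h2 := congrArg String.toList h
        rw [hsl] at h2
        rw [h2]; exact List.drop_suffix _ _
      constructor
      · intro _
        refine ⟨hs, ?_⟩
        have h3 : PySem.Chars.endswith word.toList s.toList = true :=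
          (PySem.Chars.endswith_iff _ _).mpr hsuf
        simpa using h3
      · intro _; omega
    · constructor
      · intro h0; exact absurd rfl h0
      · rintro ⟨-, hend⟩
        exfalso; apply h
        apply String.toList_inj.mp
        rw [hsl]
        obtain ⟨t, ht⟩ := (PySem.Chars.endswith_iff _ _).mp (by simpa using hend)
        have hlen : word.toList.length - s.toList.length = t.length := by
          rw [← ht]; simp
        rw [hlen, ← ht]
        simp
theorem foldMax_init (word : String) (ls : List String) :
    ∀ a : Nat, ls.foldl (fun b s => max b (pyChecker word s)) a
      = max a (ls.foldl (fun b s => max b (pyChecker word s)) 0) := by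
  induction ls with
  | nil => intro a; simp
  | cons s t ih =>
    intro a
    simp only [List.foldl_cons]
    rw [ih (max a (pyChecker word s)), ih (max 0 (pyChecker word s))]
    omega

-- A's loop body keeps a running max
theorem foldA_gen (word : String) : ∀ (ls : List String) (a : Nat),
    ls.foldl (fun lenCheck suf =>
      if suf.toList.length ≥ lenCheck then
        let new := pyChecker word suf
        if new > lenCheck then new else lenCheck
      else lenCheck) a = ls.foldl (fun b s => max b (pyChecker word s)) a := by
  intro ls
  induction ls with
  | nil => intro a; rfl
  | cons s t ih =>
    intro a
    simp only [List.foldl_cons]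
    have hbody : (if s.toList.length ≥ a then
        let new := pyChecker word s
        if new > a then new else a
      else a) = max a (pyChecker word s) := by
      have hle := pyChecker_le word s
      dsimp only
      split_ifs <;> omega
    rw [hbody, ih]

theorem pvMax_le (word : String) (c : Nat) :
    ∀ ls : List String, (∀ s ∈ ls, s.toList.length ≤ c) → pvMax word ls ≤ c := by
  intro ls
  induction ls with
  | nil => intro _; simp [pvMax]
  | cons s t ih =>
    intro h
    unfold pvMax
    simp only [List.foldl_cons]
    rw [foldMax_init]
    have h1 := pyChecker_le word s
    have h2 := h s (by simp)
    have h3 := ih (fun y hy => h y (by simp [hy]))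
    unfold pvMax at h3
    omega

-- B's early-exit scan over a length-descending list returns the split at the max matched length
theorem altScan_eq (word : String) (ls : List String)
    (hdesc : ls.Pairwise (fun a b => b.toList.length ≤ a.toList.length)) :
    altScan word ls =
      if pvMax word ls = 0 then none
      else some [PySem.Str.slice word none (some (-(pvMax word ls : Int))),
                 PySem.Str.slice word (some (-(pvMax word ls : Int))) none] := by
  induction ls with
  | nil => simp [altScan, pvMax]
  | cons s t ih =>
    have hall : ∀ y ∈ t, y.toList.length ≤ s.toList.length := fun y hy =>
      (List.pairwise_cons.mp hdesc).1 y hy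
    have ht : t.Pairwise (fun a b => b.toList.length ≤ a.toList.length) :=
      (List.pairwise_cons.mp hdesc).2
    have hM : pvMax word (s :: t) = max (pyChecker word s) (pvMax word t) := by
      unfold pvMax
      simp only [List.foldl_cons]
      rw [foldMax_init]
      omega
    by_cases hmatch : pyChecker word s ≠ 0
    · have hcond := (pyChecker_ne_zero_iff word s).mp hmatch
      have hscore : pyChecker word s = s.toList.length := by
        unfold pyChecker at hmatch ⊢
        split_ifs at hmatch ⊢ <;> omega
      have hMt : pvMax word t ≤ s.toList.length := pvMax_le word _ t hall
      have hMs : pvMax word (s :: t) = s.toList.length := by omega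
      have hne : ¬ (pvMax word (s :: t) = 0) := by omega
      rw [if_neg hne, hMs]
      simp only [altScan]
      rw [if_pos hcond]
    · rw [not_not] at hmatch
      have hcond : ¬ (s ≠ "" ∧ PySem.Str.endswith word s = true) := by
        intro h; exact absurd ((pyChecker_ne_zero_iff word s).mpr h) (by simp [hmatch])
      have hMs : pvMax word (s :: t) = pvMax word t := by omega
      rw [hMs]
      simp only [altScan]
      rw [if_neg hcond]
      exact ih ht

theorem pvMax_perm (word : String) {l1 l2 : List String} (h : l1.Perm l2) :
    pvMax word l1 = pvMax word l2 := by
  unfold pvMax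
  exact @List.Perm.foldl_eq _ _ (fun a s => max a (pyChecker word s)) _ _
    ⟨fun b a1 a2 => by omega⟩ h 0

-- ===== VERDICT (by name: the statement is the Claim_ definition above) =====
theorem checkForSuffix_spec : Claim_equal_checkForSuffix := by
  intro word suffixKeys _
  unfold Spec_checkForSuffix checkForSuffix checkForSuffix_alt
  dsimp only
  rw [foldA_gen]
  have hperm : (PySem.List.sorted suffixKeys (fun s => s.toList.length) true).Perm suffixKeys :=
    PySem.List.sorted_perm _ _ _
  rw [altScan_eq word _ (PySem.List.sorted_pairwise_rev _ _), pvMax_perm word hperm]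
  show (if ¬ pvMax word suffixKeys = 0 then _ else _) = _
  by_cases h : pvMax word suffixKeys = 0
  · rw [if_neg (by omega), if_pos h]
  · rw [if_pos h, if_neg h]
    have hz : PySem.Str.slice word (some 0) (some (-(pvMax word suffixKeys : Int)))
        = PySem.Str.slice word none (some (-(pvMax word suffixKeys : Int))) := by
      apply String.toList_inj.mp; simp
    unfold pvMax at hz ⊢
    rw [hz]
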